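-- pv_equiv track=rewrite | github.com/DaxNad/Prometeo- | scripts/atlas_bench_rank_stability.py | assembly_incoherence
-- ===== SOURCE A (Python) =====
-- from typing import Dict, List, Tuple
--
-- def assembly_incoherence(seq: List[str], code_map: Dict[str, str]) -> int:
--     # Count groups where the order_ids are not lexicographically sorted in the sequence
--     groups: Dict[str, List[str]] = {}
--     for oid in seq:
--         g = code_map.get(oid)
--         if g:
--             groups.setdefault(g, []).append(oid)
--     incoh = 0
--     for g, oids in groups.items():
--         if len(oids) < 2:
--             continue
--         if oids != sorted(oids):
--             incoh += 1
--     return incoh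
-- ===== SOURCE B (Python) =====
-- from typing import Dict, List
--
-- def assembly_incoherence(seq: List[str], code_map: Dict[str, str]) -> int:
--     # One streaming pass: remember the last order_id seen per group; a group is
--     # incoherent as soon as some order_id is smaller than its predecessor.
--     last: Dict[str, str] = {}
--     bad = set()
--     for oid in seq:
--         g = code_map.get(oid)
--         if g:
--             prev = last.get(g)
--             if prev is not None and oid < prev:
--                 bad.add(g)
--             last[g] = oid
--     return len(bad)
-- ===== Notes on version B (the rewrite author's own statement) =====
-- stated objective: alternative
-- what changed: Instead of accumulating the full order_id list per group and comparing it with its sorted copy, B keeps only the last order_id seen per group and marks a group incoherent the moment an order_id is smaller than its predecessor, counting the marked groups; it trades A's per-group buffering and sorting for a single streaming pass with O(#groups) extra state.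
import Mathlib
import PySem

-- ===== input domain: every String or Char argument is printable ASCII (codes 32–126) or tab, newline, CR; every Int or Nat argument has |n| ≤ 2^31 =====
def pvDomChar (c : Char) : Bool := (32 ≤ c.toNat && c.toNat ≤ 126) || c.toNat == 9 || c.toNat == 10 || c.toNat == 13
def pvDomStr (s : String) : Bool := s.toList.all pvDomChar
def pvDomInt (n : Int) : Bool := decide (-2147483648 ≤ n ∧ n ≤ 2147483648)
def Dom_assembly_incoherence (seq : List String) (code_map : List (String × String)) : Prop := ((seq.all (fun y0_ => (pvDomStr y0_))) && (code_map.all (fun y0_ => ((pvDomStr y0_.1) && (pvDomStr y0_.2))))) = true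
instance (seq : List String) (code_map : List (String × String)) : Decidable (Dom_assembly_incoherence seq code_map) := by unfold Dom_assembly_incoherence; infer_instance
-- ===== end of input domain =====

-- B replaces A's buffer-then-sort per-group check by a single streaming pass that
-- tracks each group's last order_id and marks a group as soon as some order_id
-- drops below its predecessor (objective: alternative). Both ports are total.

-- ===== PORT A =====
def assembly_incoherence (seq : List String) (code_map : List (String × String)) : Int :=
  let cm := PySem.Dict.ofList code_map
  let groups : PySem.Dict String (List String) :=
    seq.foldl (fun d oid =>
      match cm.get? oid with
      | some g => if g ≠ "" then d.modify g [] (fun l => l ++ [oid]) else d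
      | none => d) PySem.Dict.empty
  groups.items.foldl (fun incoh p =>
    if p.2.length < 2 then incoh
    else if p.2 ≠ PySem.List.sorted p.2 (fun x => x) then incoh + 1 else incoh) 0

-- ===== PORT B =====
def assembly_incoherence_alt (seq : List String) (code_map : List (String × String)) : Int :=
  let cm := PySem.Dict.ofList code_map
  let st :=
    seq.foldl (fun (st : PySem.Dict String String × PySem.Set String) oid =>
      match cm.get? oid with
      | some g =>
        if g ≠ "" then
          let bad := match st.1.get? g with
            | some prev => if oid < prev then PySem.Set.add st.2 g else st.2
            | none => st.2
          (st.1.insert g oid, bad)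
        else st
      | none => st) (PySem.Dict.empty, PySem.Set.empty)
  (st.2.length : Int)

-- ===== PRECONDITION & SPEC =====
def Spec_assembly_incoherence (seq : List String) (code_map : List (String × String)) (out : Int) : Prop := out = assembly_incoherence_alt seq code_map
instance (seq : List String) (code_map : List (String × String)) (out : Int) : Decidable (Spec_assembly_incoherence seq code_map out) := by unfold Spec_assembly_incoherence; infer_instance

-- ===== CLAIM (what is proved, stated in full; the proofs are below) =====
def Claim_equal_assembly_incoherence : Prop := ∀ (seq : List String) (code_map : List (String × String)), Dom_assembly_incoherence seq code_map → Spec_assembly_incoherence seq code_map (assembly_incoherence seq code_map)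

-- ===== LEMMAS AND PROOFS =====

-- A's per-element group update
def pvStepA (cm : PySem.Dict String String) (d : PySem.Dict String (List String)) (oid : String) : PySem.Dict String (List String) :=
  match cm.get? oid with
  | some g => if g ≠ "" then d.modify g [] (fun l => l ++ [oid]) else d
  | none => d

-- B's per-element state update
def pvStepB (cm : PySem.Dict String String) (st : PySem.Dict String String × PySem.Set String) (oid : String) : PySem.Dict String String × PySem.Set String :=
  match cm.get? oid with
  | some g =>
    if g ≠ "" then
      let bad := match st.1.get? g with
        | some prev => if oid < prev then PySem.Set.add st.2 g else st.2
        | none => st.2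
      (st.1.insert g oid, bad)
    else st
  | none => st

theorem pvSet_nodup_add (s : PySem.Set String) (x : String) (h : s.Nodup) : (PySem.Set.add s x).Nodup := by
  simp only [PySem.Set.add, PySem.Set.contains]
  split
  · exact h
  · next hc =>
    rw [List.contains_iff_mem] at hc
    rw [List.nodup_append]
    refine ⟨h, List.nodup_singleton x, ?_⟩
    intro a ha b hb
    rw [List.mem_singleton] at hb; subst hb
    exact fun hax => hc (hax ▸ ha)

theorem pvLe_last_of_pairwise : ∀ (l : List String) (y a : String),
    l.Pairwise (· ≤ ·) → l.getLast? = some y → a ∈ l → a ≤ y := by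
  intro l
  induction l with
  | nil => intro y a _ h; simp at h
  | cons b t ih =>
    intro y a hp hl ha
    rcases List.pairwise_cons.mp hp with ⟨hb, ht⟩
    cases t with
    | nil =>
      simp at hl ha; subst hl; subst ha; exact le_refl _
    | cons c u =>
      rw [List.getLast?_cons_cons] at hl
      rcases List.mem_cons.mp ha with rfl | ha'
      · exact le_trans (hb c (by simp)) (ih y c ht hl (by simp))
      · exact ih y a ht hl ha'

theorem pvPairwise_concat (l : List String) (x : String) :
    (l ++ [x]).Pairwise (· ≤ ·) ↔ l.Pairwise (· ≤ ·) ∧ ∀ y, l.getLast? = some y → y ≤ x := by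
  rw [List.pairwise_append]
  constructor
  · rintro ⟨h1, _, h3⟩
    exact ⟨h1, fun y hy => h3 y (List.mem_of_getLast? hy) x (by simp)⟩
  · rintro ⟨h1, h2⟩
    refine ⟨h1, List.pairwise_singleton _ _, ?_⟩
    intro a ha b hb
    rw [List.mem_singleton] at hb; subst hb
    cases hl : l.getLast? with
    | none => rw [List.getLast?_eq_none_iff] at hl; subst hl; simp at ha
    | some y => exact le_trans (pvLe_last_of_pairwise l y a h1 hl ha) (h2 y hl)

-- Main loop invariant: B's (last, bad) state mirrors A's groups dict.
theorem pvLoop_inv (cm : PySem.Dict String String) :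
    ∀ (l : List String) (G : PySem.Dict String (List String))
      (L : PySem.Dict String String) (B : PySem.Set String),
    G.keys.Nodup → B.Nodup →
    (∀ g, L.get? g = (G.getD g []).getLast?) →
    (∀ g, g ∈ B ↔ ¬ (G.getD g []).Pairwise (· ≤ ·)) →
    (l.foldl (pvStepA cm) G).keys.Nodup ∧
    (l.foldl (pvStepB cm) (L, B)).2.Nodup ∧
    (∀ g, (l.foldl (pvStepB cm) (L, B)).1.get? g = ((l.foldl (pvStepA cm) G).getD g []).getLast?) ∧
    (∀ g, g ∈ (l.foldl (pvStepB cm) (L, B)).2 ↔ ¬ ((l.foldl (pvStepA cm) G).getD g []).Pairwise (· ≤ ·)) := by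
  intro l
  induction l with
  | nil => intro G L B h1 h2 h3 h4; exact ⟨h1, h2, h3, h4⟩
  | cons oid t ih =>
    intro G L B h1 h2 h3 h4
    simp only [List.foldl_cons]
    -- analyse the two steps on oid
    rcases hg : cm.get? oid with _ | g
    · have eA : pvStepA cm G oid = G := by simp [pvStepA, hg]
      have eB : pvStepB cm (L, B) oid = (L, B) := by simp [pvStepB, hg]
      rw [eA, eB]; exact ih G L B h1 h2 h3 h4
    · by_cases hne : g = ""
      · have eA : pvStepA cm G oid = G := by simp [pvStepA, hg, hne]
        have eB : pvStepB cm (L, B) oid = (L, B) := by simp [pvStepB, hg, hne]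
        rw [eA, eB]; exact ih G L B h1 h2 h3 h4
      · have eA : pvStepA cm G oid = G.modify g [] (fun l => l ++ [oid]) := by
          simp [pvStepA, hg, hne]
        set B' : PySem.Set String :=
          (match L.get? g with
            | some prev => if oid < prev then PySem.Set.add B g else B
            | none => B) with hB'
        have eB : pvStepB cm (L, B) oid = (L.insert g oid, B') := by
          simp only [pvStepB, hg]
          rw [if_pos hne]
        rw [eA, eB]
        set G' := G.modify g [] (fun l => l ++ [oid]) with hG'
        -- new invariants
        have h1' : G'.keys.Nodup := by
          rw [hG', PySem.Dict.keys_modify]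
          by_cases hc : G.contains g
          · rw [PySem.Dict.keys_insert_of_contains _ _ hc]; exact h1
          · rw [PySem.Dict.keys_insert_of_not_contains _ _ (by simpa using hc)]
            rw [List.nodup_append]
            refine ⟨h1, List.nodup_singleton _, ?_⟩
            intro a ha b hb
            rw [List.mem_singleton] at hb
            intro hax
            exact hc ((PySem.Dict.contains_iff_mem_keys G _).mpr ((hax.trans hb) ▸ ha))
        have hGg : ∀ g', G'.getD g' [] = if g' = g then G.getD g [] ++ [oid] else G.getD g' [] := by
          intro g'; rw [hG', PySem.Dict.getD_modify]
        have h2' : B'.Nodup := by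
          rw [hB']
          rcases L.get? g with _ | prev
          · exact h2
          · dsimp only; split
            · exact pvSet_nodup_add B g h2
            · exact h2
        have h3' : ∀ g', (L.insert g oid).get? g' = (G'.getD g' []).getLast? := by
          intro g'
          rw [PySem.Dict.get?_insert, hGg g']
          by_cases he : g' = g
          · simp [he]
          · simp [he, h3 g']
        have h4' : ∀ g', g' ∈ B' ↔ ¬ (G'.getD g' []).Pairwise (· ≤ ·) := by
          intro g'
          rw [hGg g']
          by_cases he : g' = g
          · subst he
            rw [hB']
            have hLg := h3 g'
            rcases hL : L.get? g' with _ | prev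
            · -- old list is empty; new list is [oid], sorted; g' was not bad
              rw [hL] at hLg
              have : G.getD g' [] = [] := List.getLast?_eq_none_iff.mp hLg.symm
              simp [this, h4 g']
            · rw [hL] at hLg
              dsimp only
              rw [if_pos rfl]
              rw [pvPairwise_concat]
              by_cases hlt : oid < prev
              · rw [if_pos hlt]
                rw [PySem.Set.mem_add _ _ _ , h4 g']
                constructor
                · rintro (hbad | -)
                  · rintro ⟨hpw, _⟩; exact hbad hpw
                  · rintro ⟨_, hle⟩
                    exact absurd (hle prev hLg.symm) (not_le.mpr hlt)
                · intro hn
                  by_cases hpw : (G.getD g' []).Pairwise (· ≤ ·)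
                  · exact Or.inr rfl
                  · exact Or.inl hpw
              · rw [if_neg hlt]
                rw [h4 g']
                constructor
                · intro hbad ⟨hpw, _⟩; exact hbad hpw
                · intro hn hpw
                  exact hn ⟨hpw, fun y hy => by
                    rw [hy] at hLg; cases hLg
                    exact not_lt.mp hlt⟩
          · rw [if_neg he, hB']
            rcases L.get? g with _ | prev
            · exact h4 g'
            · dsimp only; split
              · rw [PySem.Set.mem_add _ _ _]
                constructor
                · rintro (hb | rfl)
                  · exact (h4 g').mp hb
                  · exact absurd rfl he
                · intro hn; exact Or.inl ((h4 g').mpr hn)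
              · exact h4 g'
        exact ih G' (L.insert g oid) B' h1' h2' h3' h4'

-- a list of fewer than 2 elements is trivially sorted
theorem pvShort_pairwise (l : List String) (h : l.length < 2) : l.Pairwise (· ≤ ·) := by
  match l, h with
  | [], _ => exact List.Pairwise.nil
  | [x], _ => exact List.pairwise_singleton _ _

theorem assembly_incoherence_spec : Claim_equal_assembly_incoherence := by
  intro seq code_map _
  unfold Spec_assembly_incoherence
  show (let cm := PySem.Dict.ofList code_map
    let groups : PySem.Dict String (List String) := seq.foldl (pvStepA cm) PySem.Dict.empty
    groups.items.foldl (fun incoh p =>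
      if p.2.length < 2 then incoh
      else if p.2 ≠ PySem.List.sorted p.2 (fun x => x) then incoh + 1 else incoh) 0)
    = (let cm := PySem.Dict.ofList code_map
       let st := seq.foldl (pvStepB cm) (PySem.Dict.empty, PySem.Set.empty)
       ((st.2.length : Nat) : Int))
  dsimp only
  set cm := PySem.Dict.ofList code_map
  obtain ⟨h1, h2, _, h4⟩ := pvLoop_inv cm seq PySem.Dict.empty PySem.Dict.empty PySem.Set.empty
    (by simp) (by simp [PySem.Set.empty]) (by simp) (by simp)
  set G := seq.foldl (pvStepA cm) PySem.Dict.empty with hG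
  set st := seq.foldl (pvStepB cm) (PySem.Dict.empty, PySem.Set.empty) with hst
  -- rewrite A's fold as a countP over the items
  have hfold : G.items.foldl (fun incoh p =>
      if p.2.length < 2 then incoh
      else if p.2 ≠ PySem.List.sorted p.2 (fun x => x) then incoh + 1 else incoh) 0
      = (G.items.countP (fun p => !decide (p.2.Pairwise (· ≤ ·))) : Int) := by
    have hstep : (fun (incoh : Int) (p : String × List String) =>
        if p.2.length < 2 then incoh
        else if p.2 ≠ PySem.List.sorted p.2 (fun x => x) then incoh + 1 else incoh)
        = (fun incoh p => if (!decide (p.2.Pairwise (· ≤ ·))) = true then incoh + 1 else incoh) := by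
      funext incoh p
      by_cases hlen : p.2.length < 2
      · rw [if_pos hlen, decide_eq_true (pvShort_pairwise _ hlen)]
        simp
      · rw [if_neg hlen]
        by_cases hs : p.2 = PySem.List.sorted p.2 (fun x => x)
        · have hpw : p.2.Pairwise (· ≤ ·) := by
            rw [hs]; exact PySem.List.sorted_pairwise p.2 (fun x => x)
          rw [if_neg (not_ne_iff.mpr hs), decide_eq_true hpw]
          simp
        · have hnp : ¬ p.2.Pairwise (· ≤ ·) := fun hpw =>
            hs (PySem.List.sorted_eq_self_of_pairwise p.2 (fun x => x) hpw).symm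
          rw [if_pos hs, decide_eq_false hnp]
          simp
    rw [hstep, PySem.List.foldl_count_if]
    simp
  rw [hfold]
  -- countP over items = length of the bad set
  rw [PySem.Dict.items_eq_map_keys G h1 [], List.countP_map, List.countP_eq_length_filter]
  have hperm : (G.keys.filter ((fun p : String × List String => !decide (p.2.Pairwise (· ≤ ·))) ∘ (fun k => (k, G.getD k [])))).Perm st.2 := by
    rw [List.perm_ext_iff_of_nodup (List.Nodup.filter _ (by
      have : G.keys.Nodup := h1
      exact this)) h2]
    intro g
    rw [List.mem_filter, h4 g]
    constructor
    · rintro ⟨_, hb⟩; simpa using hb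
    · intro hn
      refine ⟨?_, by simpa using hn⟩
      by_contra hk
      have hc : G.contains g = false := by
        by_contra hct
        exact hk ((PySem.Dict.contains_iff_mem_keys G g).mp (by simpa using hct))
      rw [PySem.Dict.getD_of_not_contains G [] hc] at hn
      exact hn List.Pairwise.nil
  rw [hperm.length_eq]
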